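-- pv_equiv track=rewrite | github.com/Veto1234-ii/LUDB_delineation_V1 | decision_maker/logic/deciser_leads.py | generate_valid_point_groups
-- ===== SOURCE A (Python) =====
-- def generate_valid_point_groups(lead1, lead2, lead3):
--
--     """
--     Генерирует все допустимые группы точек, где:
--     - Группа из 1 точки: точка только в одном отведении (два других пусты).
--     - Группа из 2 точек: точки в двух отведениях (третье пусто).
--     - Группа из 3 точек: точки во всех трёх отведениях.
--     """
--
--     groups = []
--
--     # Группы из 3 точек (если во всех трёх отведениях есть точки)
--     if lead1 and lead2 and lead3:
--         for p1 in lead1: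
--             for p2 in lead2:
--                 for p3 in lead3:
--                     groups.append([p1, p2, p3])
--
--     # Группы из 2 точек (если точки ровно в двух отведениях)
--     if lead1 and lead2 and not lead3:
--         for p1 in lead1:
--             for p2 in lead2:
--                 groups.append([p1, p2])
--     if lead1 and lead3 and not lead2:
--         for p1 in lead1:
--             for p3 in lead3:
--                 groups.append([p1, p3])
--     if lead2 and lead3 and not lead1:
--         for p2 in lead2:
--             for p3 in lead3:
--                 groups.append([p2, p3])
--
--     # Группы из 1 точки (если точка только в одном отведении)
--     if lead1 and not lead2 and not lead3:
--         groups.extend([[p1] for p1 in lead1])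
--     if lead2 and not lead1 and not lead3:
--         groups.extend([[p2] for p2 in lead2])
--     if lead3 and not lead1 and not lead2:
--         groups.extend([[p3] for p3 in lead3])
--
--
--
--     return groups
-- ===== SOURCE B (Python) =====
-- def generate_valid_point_groups(lead1, lead2, lead3):
--     # One uniform Cartesian product over the non-empty leads replaces A's seven branches.
--     leads = [l for l in (lead1, lead2, lead3) if l]
--     if not leads:
--         return []
--     groups = [[]]
--     for lead in leads:
--         groups = [g + [p] for g in groups for p in lead]
--     return groups
-- ===== Notes on version B (the rewrite author's own statement) =====
-- stated objective: simpler
-- what changed: Replaces the seven explicit emptiness branches with one uniform Cartesian-product fold over the filtered list of non-empty leads (guarding the all-empty case).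
import Mathlib
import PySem

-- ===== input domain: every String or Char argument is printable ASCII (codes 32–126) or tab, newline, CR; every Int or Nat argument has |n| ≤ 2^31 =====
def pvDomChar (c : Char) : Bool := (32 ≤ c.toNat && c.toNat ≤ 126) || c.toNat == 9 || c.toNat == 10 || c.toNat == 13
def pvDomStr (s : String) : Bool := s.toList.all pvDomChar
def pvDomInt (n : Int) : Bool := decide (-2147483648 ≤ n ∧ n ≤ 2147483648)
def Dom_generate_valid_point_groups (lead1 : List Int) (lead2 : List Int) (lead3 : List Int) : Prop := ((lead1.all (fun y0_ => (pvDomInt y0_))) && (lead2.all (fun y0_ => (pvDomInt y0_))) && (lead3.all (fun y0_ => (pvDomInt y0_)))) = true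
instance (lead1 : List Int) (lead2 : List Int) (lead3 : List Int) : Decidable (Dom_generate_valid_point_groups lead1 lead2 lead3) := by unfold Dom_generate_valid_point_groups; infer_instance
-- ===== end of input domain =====

-- B replaces A's seven emptiness branches with one Cartesian-product fold over the non-empty leads (simpler; same output).

-- ===== PORT A =====
def generate_valid_point_groups (lead1 : List Int) (lead2 : List Int) (lead3 : List Int) : List (List Int) :=
  let groups : List (List Int) := []
  let groups := if lead1 ≠ [] ∧ lead2 ≠ [] ∧ lead3 ≠ [] then
      lead1.foldl (fun a1 p1 => lead2.foldl (fun a2 p2 => lead3.foldl (fun a3 p3 => a3 ++ [[p1, p2, p3]]) a2) a1) groups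
    else groups
  let groups := if lead1 ≠ [] ∧ lead2 ≠ [] ∧ lead3 = [] then
      lead1.foldl (fun a1 p1 => lead2.foldl (fun a2 p2 => a2 ++ [[p1, p2]]) a1) groups
    else groups
  let groups := if lead1 ≠ [] ∧ lead3 ≠ [] ∧ lead2 = [] then
      lead1.foldl (fun a1 p1 => lead3.foldl (fun a2 p3 => a2 ++ [[p1, p3]]) a1) groups
    else groups
  let groups := if lead2 ≠ [] ∧ lead3 ≠ [] ∧ lead1 = [] then
      lead2.foldl (fun a1 p2 => lead3.foldl (fun a2 p3 => a2 ++ [[p2, p3]]) a1) groups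
    else groups
  let groups := if lead1 ≠ [] ∧ lead2 = [] ∧ lead3 = [] then groups ++ lead1.map (fun p1 => [p1]) else groups
  let groups := if lead2 ≠ [] ∧ lead1 = [] ∧ lead3 = [] then groups ++ lead2.map (fun p2 => [p2]) else groups
  let groups := if lead3 ≠ [] ∧ lead1 = [] ∧ lead2 = [] then groups ++ lead3.map (fun p3 => [p3]) else groups
  groups

-- ===== PORT B =====
-- groups = [g + [p] for g in groups for p in lead]
def pvProdStep (acc : List (List Int)) (lead : List Int) : List (List Int) :=
  acc.flatMap (fun g => lead.map (fun p => g ++ [p]))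

def generate_valid_point_groups_alt (lead1 : List Int) (lead2 : List Int) (lead3 : List Int) : List (List Int) :=
  let leads := [lead1, lead2, lead3].filter (fun l => !l.isEmpty)
  if leads = [] then [] else leads.foldl pvProdStep [[]]

-- ===== PRECONDITION & SPEC =====
def Spec_generate_valid_point_groups (lead1 : List Int) (lead2 : List Int) (lead3 : List Int) (out : List (List Int)) : Prop := out = generate_valid_point_groups_alt lead1 lead2 lead3
instance (lead1 : List Int) (lead2 : List Int) (lead3 : List Int) (out : List (List Int)) : Decidable (Spec_generate_valid_point_groups lead1 lead2 lead3 out) := by unfold Spec_generate_valid_point_groups; infer_instance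

-- ===== CLAIM (what is proved, stated in full; the proofs are below) =====
def Claim_equal_generate_valid_point_groups : Prop := ∀ (lead1 : List Int) (lead2 : List Int) (lead3 : List Int), Dom_generate_valid_point_groups lead1 lead2 lead3 → Spec_generate_valid_point_groups lead1 lead2 lead3 (generate_valid_point_groups lead1 lead2 lead3)

-- ===== LEMMAS AND PROOFS =====
theorem pv_flatten_map_singleton {α β : Type} (f : α → β) (l : List α) :
    (l.map (fun x => [f x])).flatten = l.map f := by
  induction l with
  | nil => rfl
  | cons a t ih => simp [ih]

theorem pv_flatten_map_flatten {α β : Type} (f : α → List (List β)) (l : List α) :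
    (l.map (fun x => (f x).flatten)).flatten = (l.map f).flatten.flatten := by
  induction l with
  | nil => rfl
  | cons a t ih => simp [ih]

theorem gvpg_main (lead1 lead2 lead3 : List Int) :
    generate_valid_point_groups lead1 lead2 lead3 = generate_valid_point_groups_alt lead1 lead2 lead3 := by
  by_cases h1 : lead1 = [] <;> by_cases h2 : lead2 = [] <;> by_cases h3 : lead3 = [] <;>
    simp [generate_valid_point_groups, generate_valid_point_groups_alt, pvProdStep, h1, h2, h3,
      List.flatMap_def, List.map_map, Function.comp_def, pv_flatten_map_singleton, pv_flatten_map_flatten]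

-- ===== VERDICT (by name: the statement is the Claim_ definition above) =====
theorem generate_valid_point_groups_spec : Claim_equal_generate_valid_point_groups := by
  intro l1 l2 l3 _
  unfold Spec_generate_valid_point_groups
  exact gvpg_main l1 l2 l3
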